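-- pv_equiv track=rewrite | github.com/vliz-be-opsci/rocrate-to-pages | src/utils/config_utils.py | check_forbidden_characters
-- ===== SOURCE A (Python) =====
-- def check_forbidden_characters(string):
--     forbidden_characters = [
--         " ",
--         ",",
--         ".",
--         "!",
--         "?",
--         ";",
--         ":",
--         "/",
--         "\\",
--         "@",
--         "#",
--         "$",
--         "%",
--         "^",
--         "&",
--         "*",
--         "(",
--         ")",
--         "[",
--         "]",
--         "{",
--         "}",
--         "|",
--         "`",
--         "~",
--         "<",
--         ">",
--         "+",
--         "=",
--         "_",
--     ]
--     for char in forbidden_characters: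
--         if char in string:
--             return False
--     return True
-- ===== SOURCE B (Python) =====
-- def check_forbidden_characters(string):
--     forbidden = set(" ,.!?;:/\\@#$%^&*()[]{}|`~<>+=_")
--     return not any(ch in forbidden for ch in string)
-- ===== Notes on version B (the rewrite author's own statement) =====
-- stated objective: idiomatic
-- what changed: B inverts the traversal: instead of 30 substring scans of the input (one per forbidden character), it makes one pass over the input string testing each character against a precomputed set of forbidden characters.
import Mathlib
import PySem

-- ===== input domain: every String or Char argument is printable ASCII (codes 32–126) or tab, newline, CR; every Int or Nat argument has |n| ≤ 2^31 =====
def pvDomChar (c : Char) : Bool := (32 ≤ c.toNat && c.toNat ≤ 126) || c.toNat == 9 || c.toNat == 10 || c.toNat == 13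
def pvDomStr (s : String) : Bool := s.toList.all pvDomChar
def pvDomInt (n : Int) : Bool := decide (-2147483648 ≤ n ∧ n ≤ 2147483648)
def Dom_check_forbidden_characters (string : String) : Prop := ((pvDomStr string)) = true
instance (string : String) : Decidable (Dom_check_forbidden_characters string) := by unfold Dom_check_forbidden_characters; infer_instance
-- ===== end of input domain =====

-- B scans the input string once against a precomputed set of forbidden characters,
-- instead of A's one substring scan of the input per forbidden character (idiomatic rewrite).

-- ===== PORT A =====
-- the literal forbidden_characters list of A
def pvForbiddenA : List String :=
  [" ", ",", ".", "!", "?", ";", ":", "/", "\\", "@", "#", "$", "%", "^", "&",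
   "*", "(", ")", "[", "]", "{", "}", "|", "`", "~", "<", ">", "+", "=", "_"]

-- the 'for char in forbidden_characters: if char in string: return False' loop
def pvLoopA (string : String) : List String → Bool
  | [] => true
  | c :: rest => if PySem.Str.isIn c string then false else pvLoopA string rest

def check_forbidden_characters (string : String) : Bool :=
  pvLoopA string pvForbiddenA

-- ===== PORT B =====
-- forbidden = set(" ,.!?;:/\\@#$%^&*()[]{}|`~<>+=_")
def pvForbiddenB : PySem.Set Char :=
  PySem.Set.ofList " ,.!?;:/\\@#$%^&*()[]{}|`~<>+=_".toList

-- not any(ch in forbidden for ch in string)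
def check_forbidden_characters_alt (string : String) : Bool :=
  !(string.toList.any (fun ch => PySem.Set.contains pvForbiddenB ch))

-- ===== PRECONDITION & SPEC =====
def Spec_check_forbidden_characters (string : String) (out : Bool) : Prop := out = check_forbidden_characters_alt string
instance (string : String) (out : Bool) : Decidable (Spec_check_forbidden_characters string out) := by unfold Spec_check_forbidden_characters; infer_instance

-- ===== CLAIM (what is proved, stated in full; the proofs are below) =====
def Claim_equal_check_forbidden_characters : Prop := ∀ (string : String), Dom_check_forbidden_characters string → Spec_check_forbidden_characters string (check_forbidden_characters string)

-- ===== LEMMAS AND PROOFS =====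

-- a singleton list is an infix iff its element is a member
theorem pv_singleton_infix {α : Type} (c : α) (l : List α) : [c] <:+: l ↔ c ∈ l := by
  constructor
  · intro h
    exact h.subset (List.mem_singleton_self c)
  · intro h
    obtain ⟨s, t, rfl⟩ := List.append_of_mem h
    exact ⟨s, t, by simp⟩

-- A's early-return loop equals "no forbidden entry occurs in the string"
theorem pvLoopA_eq (string : String) (fs : List String) :
    pvLoopA string fs = fs.all (fun c => !(PySem.Str.isIn c string)) := by
  induction fs with
  | nil => rfl
  | cons c rest ih =>
      simp only [pvLoopA, List.all_cons, ih]
      cases PySem.Str.isIn c string <;> simp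


-- forbidden membership in B's set equals membership in the character list
theorem pv_contains_eq (c : Char) :
    PySem.Set.contains pvForbiddenB c = decide (c ∈ " ,.!?;:/\\@#$%^&*()[]{}|`~<>+=_".toList) := by
  rw [Bool.eq_iff_iff]
  simp [pvForbiddenB, PySem.Set.mem_ofList]

-- the key inversion: scanning F's entries for substring hits = scanning l for forbidden chars
theorem pv_key (F : List String) (C : List Char)
    (h : F.map String.toList = C.map (fun c => [c])) (s : String) :
    F.all (fun f => !(PySem.Str.isIn f s)) = !(s.toList.any (fun c => decide (c ∈ C))) := by
  rw [Bool.eq_iff_iff]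
  simp only [List.all_eq_true, Bool.not_eq_true', Bool.not_eq_true, List.any_eq_false,
    decide_eq_false_iff_not, Bool.not_eq_true]
  constructor
  · intro hF c hcl hcC
    have : [c] ∈ F.map String.toList := by
      rw [h]; exact List.mem_map.mpr ⟨c, hcC, rfl⟩
    obtain ⟨f, hfF, hf⟩ := List.mem_map.mp this
    have hfalse := hF f hfF
    rw [Bool.eq_false_iff] at hfalse
    apply hfalse
    rw [PySem.Str.isIn_iff_infix, hf]
    exact (pv_singleton_infix c _).mpr hcl
  · intro hl f hfF
    have : f.toList ∈ C.map (fun c => [c]) := by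
      rw [← h]; exact List.mem_map.mpr ⟨f, hfF, rfl⟩
    obtain ⟨c, hcC, hf⟩ := List.mem_map.mp this
    rw [Bool.eq_false_iff]
    intro htrue
    rw [PySem.Str.isIn_iff_infix, ← hf] at htrue
    have hcl : c ∈ s.toList := (pv_singleton_infix c _).mp htrue
    exact hl c hcl hcC

theorem check_forbidden_characters_spec : Claim_equal_check_forbidden_characters := by
  intro string _
  show check_forbidden_characters string = check_forbidden_characters_alt string
  unfold check_forbidden_characters check_forbidden_characters_alt
  rw [pvLoopA_eq]
  have hmap : pvForbiddenA.map String.toList =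
      " ,.!?;:/\\@#$%^&*()[]{}|`~<>+=_".toList.map (fun c => [c]) := by decide
  rw [funext pv_contains_eq]
  exact pv_key pvForbiddenA _ hmap string
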